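-- pv_equiv track=rewrite | github.com/krnets/codewars-practice | 6kyu/Traverse array elements diagonally/kata.py | diagonal
-- ===== SOURCE A (Python) =====
-- def diagonal(ar):
--     n = len(ar)
--     res = []
--
--     for m in range(2 * n - 2, -1, -1):
--         r = max(0, m - n + 1)
--         c = m - r
--
--         while r < n and c >= 0:
--             res.append(ar[r][c])
--             r += 1
--             c -= 1
--
--     return res
-- ===== SOURCE B (Python) =====
-- def diagonal(ar):
--     n = len(ar)
--     buckets = {}
--     for r in range(n):
--         for c in range(n):
--             buckets.setdefault(r + c, []).append(ar[r][c])
--     res = []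
--     for m in range(2 * n - 2, -1, -1):
--         res += buckets.get(m, [])
--     return res
-- ===== Notes on version B (the rewrite author's own statement) =====
-- stated objective: alternative
-- what changed: Replaces A's per-diagonal index-walk (for each anti-diagonal sum m, a while loop stepping r+=1, c-=1) with a single row-major pass that buckets every element into a dict keyed by r+c, then concatenates the buckets for m = 2n-2 down to 0.
import Mathlib
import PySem

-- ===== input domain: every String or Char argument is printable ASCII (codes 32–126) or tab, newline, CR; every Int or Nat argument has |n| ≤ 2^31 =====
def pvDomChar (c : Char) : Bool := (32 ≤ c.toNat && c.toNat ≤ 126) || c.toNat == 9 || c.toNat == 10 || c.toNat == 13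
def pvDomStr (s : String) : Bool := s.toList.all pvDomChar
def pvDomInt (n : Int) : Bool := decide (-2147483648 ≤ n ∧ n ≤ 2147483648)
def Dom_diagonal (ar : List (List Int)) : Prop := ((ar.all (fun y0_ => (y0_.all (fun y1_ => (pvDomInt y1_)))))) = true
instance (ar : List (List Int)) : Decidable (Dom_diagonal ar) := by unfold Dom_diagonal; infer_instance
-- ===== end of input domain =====

-- B replaces A's per-diagonal while-walk by one row-major pass into a dict of buckets keyed by r+c
-- (objective: alternative decomposition, same cost).

-- ar[r][c]; the defaults only fire outside Pre_diagonal (where the Python raises IndexError)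
def getAt (ar : List (List Int)) (r c : Int) : Int :=
  PySem.List.pyGetD (PySem.List.pyGetD ar r []) c 0

-- ===== PORT A =====
-- the inner 'while r < n and c >= 0' loop; fuel bounds the iteration count (r increases each step)
def diagLoop (ar : List (List Int)) (n : Int) : Nat → Int → Int → List Int → List Int
  | 0, _, _, res => res
  | fuel+1, r, c, res =>
      if r < n ∧ c ≥ 0 then diagLoop ar n fuel (r+1) (c-1) (res ++ [getAt ar r c])
      else res

def diagonal (ar : List (List Int)) : List Int :=
  let n : Int := ar.length
  (PySem.List.pyRange (2*n - 2) (-1) (-1)).foldl (fun res m =>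
    let r := max 0 (m - n + 1)
    let c := m - r
    diagLoop ar n (n - r).toNat r c res) []

-- ===== PORT B =====
def diagonal_alt (ar : List (List Int)) : List Int :=
  let n : Int := ar.length
  let buckets : PySem.Dict Int (List Int) :=
    (PySem.List.pyRange 0 n 1).foldl (fun d r =>
      (PySem.List.pyRange 0 n 1).foldl (fun d c =>
        d.modify (r + c) [] (fun l => l ++ [getAt ar r c])) d) PySem.Dict.empty
  (PySem.List.pyRange (2*n - 2) (-1) (-1)).foldl (fun res m => res ++ buckets.getD m []) []

-- ===== PRECONDITION & SPEC =====
-- exactly where the Python A returns: every row needs at least len(ar) entries, else ar[r][c] raises IndexError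
def Pre_diagonal (ar : List (List Int)) : Prop := ∀ row ∈ ar, ar.length ≤ row.length
instance (ar : List (List Int)) : Decidable (Pre_diagonal ar) := by unfold Pre_diagonal; infer_instance
def pvWitness_diagonal : List (List Int) := [[1, 2], [3, 4]]

def Spec_diagonal (ar : List (List Int)) (out : List Int) : Prop := out = diagonal_alt ar
instance (ar : List (List Int)) (out : List Int) : Decidable (Spec_diagonal ar out) := by unfold Spec_diagonal; infer_instance

-- ===== CLAIM (what is proved, stated in full; the proofs are below) =====
def Claim_equal_diagonal : Prop := ∀ (ar : List (List Int)), Dom_diagonal ar → Pre_diagonal ar → Spec_diagonal ar (diagonal ar)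

-- ===== LEMMAS AND PROOFS =====

-- A's while loop walks diagonal m upward from row r: it is the map over rows r ≤ j < min n (m+1)
lemma diagLoop_eq (ar : List (List Int)) (n m : Int) :
    ∀ (fuel : Nat) (r : Int) (res : List Int), (min n (m+1) - r).toNat ≤ fuel →
      diagLoop ar n fuel r (m - r) res
        = res ++ (PySem.List.pyRange r (min n (m+1)) 1).map (fun j => getAt ar j (m - j)) := by
  intro fuel
  induction fuel with
  | zero =>
    intro r res h
    rw [PySem.List.pyRange_one_eq_nil (by omega)]
    simp [diagLoop]
  | succ fuel ih =>
    intro r res h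
    by_cases hc : r < n ∧ m - r ≥ 0
    · rw [PySem.List.pyRange_one_cons (by omega)]
      simp only [diagLoop, if_pos hc, List.map_cons]
      have : m - r - 1 = m - (r + 1) := by ring
      rw [this, ih (r+1) _ (by omega)]
      simp
    · rw [PySem.List.pyRange_one_eq_nil (by omega)]
      simp only [diagLoop]; rw [if_neg hc]; simp

-- the only c ∈ range(n) putting something into bucket m during row r is c = m - r
lemma filter_range_eq (n m r : Int) :
    (PySem.List.pyRange 0 n 1).filter (fun c => r + c == m)
      = if 0 ≤ m - r ∧ m - r < n then [m - r] else [] := by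
  have hcongr : ∀ c ∈ PySem.List.pyRange 0 n 1, (r + c == m) = (c == m - r) := by
    intro c _
    rcases eq_or_ne (r + c) m with h | h
    · simp [show c = m - r by omega]
    · simp [h, show c ≠ m - r by omega]
  rw [List.filter_congr hcongr, List.filter_beq]
  by_cases hm : 0 ≤ m - r ∧ m - r < n
  · rw [if_pos hm]
    have hmem : m - r ∈ PySem.List.pyRange 0 n 1 := by
      rw [PySem.List.mem_pyRange_one]; omega
    rw [List.count_eq_one_of_mem (PySem.List.nodup_pyRange_one 0 n) hmem]
    simp
  · rw [if_neg hm]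
    have hmem : m - r ∉ PySem.List.pyRange 0 n 1 := by
      rw [PySem.List.mem_pyRange_one]; omega
    rw [List.count_eq_zero_of_not_mem hmem]
    simp

-- the c-loop of B touches bucket m at most once, at c = m - r
lemma inner_bucket (ar : List (List Int)) (n m r : Int) (d : PySem.Dict Int (List Int)) :
    ((PySem.List.pyRange 0 n 1).foldl (fun d c =>
        d.modify (r + c) [] (fun l => l ++ [getAt ar r c])) d).getD m []
      = d.getD m [] ++ (if 0 ≤ m - r ∧ m - r < n then [getAt ar r (m - r)] else []) := by
  have h1 : (PySem.List.pyRange 0 n 1).foldl (fun d c =>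
        d.modify (r + c) [] (fun l => l ++ [getAt ar r c])) d
      = (((PySem.List.pyRange 0 n 1).map (fun c => (r + c, getAt ar r c))).foldl
          (fun d p => d.modify p.1 [] (fun l => l ++ [p.2])) d) := by
    rw [List.foldl_map]
  rw [h1, PySem.Dict.getD_foldl_modify_append, List.filter_map, List.map_map]
  have h2 : ((fun p => p.1 == m) ∘ fun c => (r + c, getAt ar r c)) = fun c => r + c == m := rfl
  rw [h2, filter_range_eq]
  by_cases hm : 0 ≤ m - r ∧ m - r < n
  · rw [if_pos hm, if_pos hm]
    simp
  · rw [if_neg hm, if_neg hm]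
    simp

-- bucket m after the whole row-major build
lemma outer_bucket (ar : List (List Int)) (n m : Int) :
    ∀ (rs : List Int) (d : PySem.Dict Int (List Int)),
      ((rs.foldl (fun d r =>
          (PySem.List.pyRange 0 n 1).foldl (fun d c =>
            d.modify (r + c) [] (fun l => l ++ [getAt ar r c])) d) d).getD m [])
        = d.getD m [] ++ rs.flatMap (fun r =>
            if 0 ≤ m - r ∧ m - r < n then [getAt ar r (m - r)] else []) := by
  intro rs
  induction rs with
  | nil => simp
  | cons r rs ih =>
    intro d
    simp only [List.foldl_cons, List.flatMap_cons, ih, inner_bucket, List.append_assoc]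

-- per-diagonal agreement: bucket m is exactly A's walk of diagonal m
lemma bucket_eq_diag (ar : List (List Int)) (n m : Int) (hn : n = (ar.length : Int))
    (hm0 : 0 ≤ m) (hm1 : m ≤ 2*n - 2) :
    (PySem.List.pyRange 0 n 1).flatMap (fun r =>
        if 0 ≤ m - r ∧ m - r < n then [getAt ar r (m - r)] else [])
      = (PySem.List.pyRange (max 0 (m - n + 1)) (min n (m+1)) 1).map (fun j => getAt ar j (m - j)) := by
  set r0 : Int := max 0 (m - n + 1) with hr0
  set hi : Int := min n (m + 1) with hhi
  have h2 : r0 ≤ hi := by omega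
  have h3 : hi ≤ n := by omega
  rw [PySem.List.pyRange_one_append 0 r0 n (by omega) (by omega),
      PySem.List.pyRange_one_append r0 hi n h2 h3,
      List.flatMap_append, List.flatMap_append]
  have e1 : (PySem.List.pyRange 0 r0 1).flatMap (fun r =>
      if 0 ≤ m - r ∧ m - r < n then [getAt ar r (m - r)] else []) = [] := by
    apply List.flatMap_eq_nil_iff.mpr
    intro r hr
    rw [PySem.List.mem_pyRange_one] at hr
    rw [if_neg (by omega)]
  have e3 : (PySem.List.pyRange hi n 1).flatMap (fun r =>
      if 0 ≤ m - r ∧ m - r < n then [getAt ar r (m - r)] else []) = [] := by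
    apply List.flatMap_eq_nil_iff.mpr
    intro r hr
    rw [PySem.List.mem_pyRange_one] at hr
    rw [if_neg (by omega)]
  rw [e1, e3, List.nil_append, List.append_nil]
  have e2 : ∀ l : List Int, (∀ r ∈ l, 0 ≤ m - r ∧ m - r < n) →
      l.flatMap (fun r => if 0 ≤ m - r ∧ m - r < n then [getAt ar r (m - r)] else [])
        = l.map (fun j => getAt ar j (m - j)) := by
    intro l
    induction l with
    | nil => intro _; rfl
    | cons x xs ih =>
      intro hmem
      rw [List.flatMap_cons, List.map_cons, if_pos (hmem x (by simp)),
          ih (fun r hr => hmem r (by simp [hr]))]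
      rfl
  exact e2 _ (fun r hr => by rw [PySem.List.mem_pyRange_one] at hr; omega)

-- ===== VERDICT (by name: the statement is the Claim_ definition above) =====
theorem diagonal_spec : Claim_equal_diagonal := by
  intro ar _ _
  unfold Spec_diagonal
  simp only [diagonal, diagonal_alt]
  apply PySem.List.foldl_congr_mem
  intro res m hm
  rw [PySem.List.mem_pyRange_neg_one] at hm
  rw [diagLoop_eq ar _ m _ _ res (by omega)]
  rw [outer_bucket, PySem.Dict.getD_empty]
  rw [bucket_eq_diag ar _ m rfl (by omega) (by omega), List.nil_append]
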